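-- pv_equiv track=rewrite | github.com/srikantharun/test-api | hw/vendor/axelera/cva6v/default/dv/scripts/create_testlist/create_testlist.py | parse_asm_test_path
-- ===== SOURCE A (Python) =====
-- def parse_asm_test_path(
--     asm_test_path: list[str],
--     allowed_sets: list[str],
--     allowed_extensions: list[str],
--     target: str,
-- ) -> tuple[bool, str, str, str]:
--     """
--         Returns True if one of allowed_set and allowed_extension in the path
--         Returns matched allowed_set, allowed_extension and asm testname w/o .S and _ as separator
--         False + empty strings otherwise
--     """
--     if target == "arch":
--         for allowed_set in allowed_sets:
--             if allowed_set in asm_test_path: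
--                 for allowed_extenstion in allowed_extensions:
--                     if allowed_extenstion in asm_test_path:
--                         asm_test_name = asm_test_path[-1][:-2] # get test name, drop .S
--                         asm_test_name = asm_test_name.replace("-", "_").replace(".", "_")
--                         return True, allowed_set+"_"+allowed_extenstion, asm_test_name
--     else:
--         asm_test_name = asm_test_path[-1][:-2] # get test name, drop .S
--         asm_test_name = asm_test_name.replace("-", "_").replace(".", "_")
--         return True, asm_test_path[-3], asm_test_name
--     return False, "", ""
-- ===== SOURCE B (Python) =====
-- def parse_asm_test_path(
--     asm_test_path: list[str],
--     allowed_sets: list[str],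
--     allowed_extensions: list[str],
--     target: str,
-- ):
--     if target == "arch":
--         matched_set = next((s for s in allowed_sets if s in asm_test_path), None)
--         matched_ext = next((e for e in allowed_extensions if e in asm_test_path), None)
--         if matched_set is not None and matched_ext is not None:
--             name = asm_test_path[-1][:-2].replace("-", "_").replace(".", "_")
--             return True, matched_set + "_" + matched_ext, name
--         return False, "", ""
--     name = asm_test_path[-1][:-2].replace("-", "_").replace(".", "_")
--     return True, asm_test_path[-3], name
-- ===== Notes on version B (the rewrite author's own statement) =====
-- stated objective: simpler
-- what changed: Replaces A's nested set-by-extension loop in the arch branch with two independent first-match scans (matched set, matched extension) combined once; the non-arch branch is unchanged.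
-- outside the precondition, e.g. on parse_asm_test_path(['x.S'], [], [], 'other'): A raises IndexError, B raises IndexError
import Mathlib
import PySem

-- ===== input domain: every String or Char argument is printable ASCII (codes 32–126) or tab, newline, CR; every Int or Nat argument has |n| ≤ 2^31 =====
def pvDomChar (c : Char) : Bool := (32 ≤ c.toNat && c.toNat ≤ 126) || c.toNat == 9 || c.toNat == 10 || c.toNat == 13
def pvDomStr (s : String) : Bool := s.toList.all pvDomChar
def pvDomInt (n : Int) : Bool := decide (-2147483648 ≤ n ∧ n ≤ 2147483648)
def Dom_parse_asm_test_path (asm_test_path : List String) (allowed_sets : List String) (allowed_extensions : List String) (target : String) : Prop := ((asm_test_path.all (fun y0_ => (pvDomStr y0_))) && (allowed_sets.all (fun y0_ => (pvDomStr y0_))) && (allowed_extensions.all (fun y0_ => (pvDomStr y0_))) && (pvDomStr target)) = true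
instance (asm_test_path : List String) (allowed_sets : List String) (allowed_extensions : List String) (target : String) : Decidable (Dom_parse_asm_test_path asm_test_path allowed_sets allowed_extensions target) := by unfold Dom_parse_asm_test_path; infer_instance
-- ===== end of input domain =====

-- B replaces A's nested set×extension loop by two independent first-match scans (different decomposition; objective: simpler).
-- Equivalence is about RETURN VALUES; neither program mutates its arguments.

-- shared by both ports: asm_test_path[-1][:-2].replace("-","_").replace(".","_"), the identical line in both Pythons
def pvTestName (asm_test_path : List String) : String :=
  PySem.Str.replace (PySem.Str.replace (PySem.Str.slice (PySem.List.pyGetD asm_test_path (-1) "") none (some (-2))) "-" "_") "." "_"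

-- ===== PORT A =====
-- inner 'for allowed_extenstion in allowed_extensions: if … return …'
def pvInnerA (asm_test_path : List String) (exts : List String) (s : String) : Option (Bool × String × String) :=
  match exts with
  | [] => none
  | e :: rest =>
    if asm_test_path.contains e then some (true, s ++ "_" ++ e, pvTestName asm_test_path)
    else pvInnerA asm_test_path rest s

-- outer 'for allowed_set in allowed_sets: …', falling through to 'return False, "", ""'
def pvOuterA (asm_test_path : List String) (sets : List String) (exts : List String) : Bool × String × String :=
  match sets with
  | [] => (false, "", "")
  | s :: rest =>
    if asm_test_path.contains s then
      match pvInnerA asm_test_path exts s with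
      | some r => r
      | none => pvOuterA asm_test_path rest exts
    else pvOuterA asm_test_path rest exts

def parse_asm_test_path (asm_test_path : List String) (allowed_sets : List String) (allowed_extensions : List String) (target : String) : Bool × String × String :=
  if target = "arch" then pvOuterA asm_test_path allowed_sets allowed_extensions
  else (true, PySem.List.pyGetD asm_test_path (-3) "", pvTestName asm_test_path)

-- ===== PORT B =====
def parse_asm_test_path_alt (asm_test_path : List String) (allowed_sets : List String) (allowed_extensions : List String) (target : String) : Bool × String × String :=
  if target = "arch" then
    match allowed_sets.find? (fun s => asm_test_path.contains s),
          allowed_extensions.find? (fun e => asm_test_path.contains e) with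
    | some s, some e => (true, s ++ "_" ++ e, pvTestName asm_test_path)
    | _, _ => (false, "", "")
  else (true, PySem.List.pyGetD asm_test_path (-3) "", pvTestName asm_test_path)

-- ===== PRECONDITION & SPEC =====
-- Pre_ excludes only inputs where A raises IndexError: in the non-"arch" branch asm_test_path[-3]
-- (and [-1]) raise when the path has fewer than 3 elements.
def Pre_parse_asm_test_path (asm_test_path : List String) (allowed_sets : List String) (allowed_extensions : List String) (target : String) : Prop :=
  target = "arch" ∨ 3 ≤ asm_test_path.length
instance (asm_test_path : List String) (allowed_sets : List String) (allowed_extensions : List String) (target : String) : Decidable (Pre_parse_asm_test_path asm_test_path allowed_sets allowed_extensions target) := by unfold Pre_parse_asm_test_path; infer_instance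
def pvWitness_parse_asm_test_path : List String × List String × List String × String :=
  (["rv64i", "m", "my-test.S"], ["rv64i"], ["m"], "arch")

def Spec_parse_asm_test_path (asm_test_path : List String) (allowed_sets : List String) (allowed_extensions : List String) (target : String) (out : Bool × String × String) : Prop := out = parse_asm_test_path_alt asm_test_path allowed_sets allowed_extensions target
instance (asm_test_path : List String) (allowed_sets : List String) (allowed_extensions : List String) (target : String) (out : Bool × String × String) : Decidable (Spec_parse_asm_test_path asm_test_path allowed_sets allowed_extensions target out) := by unfold Spec_parse_asm_test_path; infer_instance

-- ===== CLAIM (what is proved, stated in full; the proofs are below) =====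
def Claim_equal_parse_asm_test_path : Prop := ∀ (asm_test_path : List String) (allowed_sets : List String) (allowed_extensions : List String) (target : String), Dom_parse_asm_test_path asm_test_path allowed_sets allowed_extensions target → Pre_parse_asm_test_path asm_test_path allowed_sets allowed_extensions target → Spec_parse_asm_test_path asm_test_path allowed_sets allowed_extensions target (parse_asm_test_path asm_test_path allowed_sets allowed_extensions target)

-- ===== LEMMAS AND PROOFS =====
-- A's inner loop is the first-match scan over the extensions, tagged with the current set s.
theorem pvInnerA_eq (asm_test_path : List String) (exts : List String) (s : String) :
    pvInnerA asm_test_path exts s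
      = (exts.find? (fun e => asm_test_path.contains e)).map
          (fun e => (true, s ++ "_" ++ e, pvTestName asm_test_path)) := by
  induction exts with
  | nil => rfl
  | cons e rest ih =>
    by_cases h : e ∈ asm_test_path
    · simp [pvInnerA, List.find?, h]
    · simp [pvInnerA, List.find?, h, ih]

-- A's nested loops compute exactly B's two-scan combination.
theorem pvOuterA_eq (asm_test_path : List String) (exts : List String) (sets : List String) :
    pvOuterA asm_test_path sets exts
      = match sets.find? (fun s => asm_test_path.contains s),
              exts.find? (fun e => asm_test_path.contains e) with
        | some s, some e => (true, s ++ "_" ++ e, pvTestName asm_test_path)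
        | _, _ => ((false : Bool), "", "") := by
  induction sets with
  | nil => rfl
  | cons s rest ih =>
    by_cases h : s ∈ asm_test_path
    · rw [List.find?_cons_of_pos (by simpa using h)]
      cases hE : exts.find? (fun e => asm_test_path.contains e) with
      | some e =>
        have hE' : exts.find? (fun e => decide (e ∈ asm_test_path)) = some e := by simpa using hE
        simp [pvOuterA, pvInnerA_eq, h, hE']
      | none =>
        have hL : pvOuterA asm_test_path (s :: rest) exts = pvOuterA asm_test_path rest exts := by
          have hE' : exts.find? (fun e => decide (e ∈ asm_test_path)) = none := by simpa using hE
          simp [pvOuterA, pvInnerA_eq, h, hE']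
        rw [hL, ih, hE]
        cases rest.find? (fun s => asm_test_path.contains s) <;> rfl
    · have hL : pvOuterA asm_test_path (s :: rest) exts = pvOuterA asm_test_path rest exts := by
        simp [pvOuterA, h]
      rw [hL, ih, List.find?_cons_of_neg (by simpa using h)]

-- ===== VERDICT (by name: the statement is the Claim_ definition above) =====
theorem parse_asm_test_path_spec : Claim_equal_parse_asm_test_path := by
  intro path sets exts target _ _
  unfold Spec_parse_asm_test_path parse_asm_test_path parse_asm_test_path_alt
  by_cases h : target = "arch"
  · simp only [h, if_pos]
    exact pvOuterA_eq path exts sets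
  · simp [h]
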